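-- pv_equiv track=rewrite | github.com/simdorei/33income | src/income33/agent/browser_control.py | _business_number_mode
-- ===== SOURCE A (Python) =====
-- from typing import Any
--
-- ZERO_BUSINESS_NUMBER = "000-00-00000"
--
-- def _business_number_mode(items: list[dict[str, Any]]) -> str:
--     has_zero = any(item["business_number"] == ZERO_BUSINESS_NUMBER for item in items)
--     has_other = any(item["business_number"] != ZERO_BUSINESS_NUMBER for item in items)
--     if has_zero and has_other:
--         return "mixed"
--     if has_zero:
--         return "zero_only"
--     return "general_only"
-- ===== SOURCE B (Python) =====
-- ZERO_BUSINESS_NUMBER = "000-00-00000"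
--
-- def _business_number_mode(items):
--     has_zero = False
--     has_other = False
--     for item in items:
--         bn = item["business_number"]
--         if bn == ZERO_BUSINESS_NUMBER:
--             has_zero = True
--         else:
--             has_other = True
--         if has_zero and has_other:
--             break
--     if has_zero and has_other:
--         return "mixed"
--     if has_zero:
--         return "zero_only"
--     return "general_only"
-- ===== Notes on version B (the rewrite author's own statement) =====
-- stated objective: simpler
-- what changed: B replaces A's two independent any() scans over the list by a single flag-maintaining pass that breaks as soon as both a zero and a non-zero business number have been seen, then applies the same three-way branch.
import Mathlib
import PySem

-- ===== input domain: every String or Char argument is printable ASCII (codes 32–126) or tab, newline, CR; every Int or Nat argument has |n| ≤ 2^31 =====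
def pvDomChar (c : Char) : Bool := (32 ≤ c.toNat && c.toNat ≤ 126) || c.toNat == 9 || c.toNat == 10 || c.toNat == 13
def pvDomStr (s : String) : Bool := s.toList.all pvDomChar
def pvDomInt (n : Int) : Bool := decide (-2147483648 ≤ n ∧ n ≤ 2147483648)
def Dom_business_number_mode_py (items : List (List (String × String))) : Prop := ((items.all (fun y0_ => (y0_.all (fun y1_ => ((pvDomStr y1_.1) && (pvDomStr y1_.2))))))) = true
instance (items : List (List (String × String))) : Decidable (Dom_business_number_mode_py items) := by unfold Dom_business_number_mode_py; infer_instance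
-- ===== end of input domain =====

-- B: one flag-maintaining pass with early exit instead of A's two any() scans; same results (and same KeyError points in Python).


-- dict[str,Any] is an association list; item["business_number"] is a first-match lookup.
-- Under Pre_ the key is present at every item the Python actually reads, so the `.getD ""`
-- default is never the returned value there (it is exact on the admitted inputs).
def pvBN (item : List (String × String)) : String :=
  (item.lookup "business_number").getD ""

def pvZERO : String := "000-00-00000"

-- ===== PORT A =====
def business_number_mode_py (items : List (List (String × String))) : String :=
  let has_zero := items.any (fun item => pvBN item == pvZERO)
  let has_other := items.any (fun item => pvBN item != pvZERO)
  if has_zero && has_other then "mixed"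
  else if has_zero then "zero_only"
  else "general_only"

-- ===== PORT B =====
-- the for-loop of Source B: flags (has_zero, has_other), break once both are true
def pvLoopB (items : List (List (String × String))) (has_zero has_other : Bool) : Bool × Bool :=
  match items with
  | [] => (has_zero, has_other)
  | item :: rest =>
    let bn := pvBN item
    let has_zero' := if bn == pvZERO then true else has_zero
    let has_other' := if bn == pvZERO then has_other else true
    if has_zero' && has_other' then (has_zero', has_other')
    else pvLoopB rest has_zero' has_other'

def business_number_mode_py_alt (items : List (List (String × String))) : String :=
  let r := pvLoopB items false false
  if r.1 && r.2 then "mixed"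
  else if r.1 then "zero_only"
  else "general_only"

-- ===== PRECONDITION & SPEC =====
-- Pre_ excludes exactly the inputs on which the Python raises KeyError: some item lacks the
-- "business_number" key at a position whose preceding items do not already contain both a zero
-- and a non-zero business number (both scans of A, and B's loop, stop only once both were seen).
def Pre_business_number_mode_py (items : List (List (String × String))) : Prop :=
  ∀ k, (h : k < items.length) → items[k].lookup "business_number" = none →
    ((items.take k).any (fun item => item.lookup "business_number" == some pvZERO)
      ∧ (items.take k).any (fun item =>
          match item.lookup "business_number" with
          | some v => v != pvZERO
          | none => false))
instance (items : List (List (String × String))) : Decidable (Pre_business_number_mode_py items) := by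
  unfold Pre_business_number_mode_py; infer_instance

def pvWitness_business_number_mode_py : (List (List (String × String))) :=
  [[("business_number", "000-00-00000")], [("business_number", "123-45-67890"), ("name", "a")]]

def Spec_business_number_mode_py (items : List (List (String × String))) (out : String) : Prop := out = business_number_mode_py_alt items
instance (items : List (List (String × String))) (out : String) : Decidable (Spec_business_number_mode_py items out) := by unfold Spec_business_number_mode_py; infer_instance

-- ===== CLAIM (what is proved, stated in full; the proofs are below) =====
def Claim_equal_business_number_mode_py : Prop := ∀ (items : List (List (String × String))), Dom_business_number_mode_py items → Pre_business_number_mode_py items → Spec_business_number_mode_py items (business_number_mode_py items)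

-- ===== LEMMAS AND PROOFS =====

-- B's loop computes exactly the two any-scans of A (the early break fires only when both
-- flags are already true, in which case both disjunctions are true anyway).
theorem pvLoopB_eq (items : List (List (String × String))) :
    ∀ hz ho, pvLoopB items hz ho =
      (hz || items.any (fun item => pvBN item == pvZERO),
       ho || items.any (fun item => pvBN item != pvZERO)) := by
  induction items with
  | nil => intro hz ho; simp [pvLoopB]
  | cons item rest ih =>
    intro hz ho
    cases hb : (pvBN item == pvZERO) <;> cases hz <;> cases ho <;>
      simp [pvLoopB, hb, ih, bne, List.any_cons]

-- ===== VERDICT (by name: the statement is the Claim_ definition above) =====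
theorem business_number_mode_py_spec : Claim_equal_business_number_mode_py := by
  intro items _ _
  unfold Spec_business_number_mode_py business_number_mode_py business_number_mode_py_alt
  rw [pvLoopB_eq]
  simp
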